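-- pv_equiv track=rewrite | github.com/tanyalamonova/data_transform | transform.py | compose_rows
-- ===== SOURCE A (Python) =====
-- def compose_rows(data, order_by="D1"):
--     """
--     Compose result dataset based on current dictionary,
--     sort it by selected column.
--     """
--
--     # create a new dataset starting with column names
--     rows = []
--     rows.append(list(data.keys()))
--
--     # find selected column's index in order to sort values
--     order_index = rows[0].index(order_by)
--
--     # convert dictionary values (column values) to list of tuples (row values)
--     set_of_values = list(zip(*data.values()))
--
--     # sort rows by selected column
--     sorted_set = sorted(set_of_values, key=lambda v: v[order_index])
--
--     # add sorted rows to the result dataset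
--     rows.extend([list(new_row) for new_row in sorted_set])
--
--     return rows
-- ===== SOURCE B (Python) =====
-- def compose_rows(data, order_by="D1"):
--     """Group rows into buckets keyed by the order column's value, then
--     emit the buckets in sorted key order (a bucket sort / group-by),
--     instead of sorting the list of zipped rows."""
--     cols = list(data.values())
--     n = min(len(c) for c in cols)       # zip truncates to the shortest column
--     order_col = data[order_by]
--     buckets = {}
--     for i in range(n):
--         buckets.setdefault(order_col[i], []).append([c[i] for c in cols])
--     rows = [list(data.keys())]
--     for value in sorted(buckets):
--         rows.extend(buckets[value])
--     return rows
-- ===== Notes on version B (the rewrite author's own statement) =====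
-- stated objective: alternative
-- what changed: B is a group-by/bucket sort: it builds a dict mapping each order-column value to the list of its rows in one pass, then emits the buckets in sorted key order, instead of zipping all columns into row tuples and comparison-sorting that row list.
import Mathlib
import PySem

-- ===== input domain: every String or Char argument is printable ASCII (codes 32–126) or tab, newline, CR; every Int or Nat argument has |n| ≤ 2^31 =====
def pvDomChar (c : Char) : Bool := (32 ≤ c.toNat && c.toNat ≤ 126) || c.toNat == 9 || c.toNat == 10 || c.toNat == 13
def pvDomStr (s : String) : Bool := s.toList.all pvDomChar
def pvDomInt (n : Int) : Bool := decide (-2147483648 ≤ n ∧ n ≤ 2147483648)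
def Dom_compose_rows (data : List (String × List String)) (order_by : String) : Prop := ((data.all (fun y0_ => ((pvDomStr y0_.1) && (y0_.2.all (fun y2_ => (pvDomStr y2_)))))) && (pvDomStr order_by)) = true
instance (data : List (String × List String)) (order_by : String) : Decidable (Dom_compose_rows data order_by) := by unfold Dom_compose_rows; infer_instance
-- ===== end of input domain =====

-- B is a group-by / bucket sort: one pass collects each row into a dict bucket keyed by its
-- order-column value, then the buckets are emitted in sorted key order (same cost, different algorithm).

-- ===== PORT A =====
-- hand port of zip(*cols) (tuples rendered as lists, as A immediately converts them):
-- exact zip semantics — truncates to the shortest column; every access is in range.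
def pyZipStar (cols : List (List String)) : List (List String) :=
  match cols with
  | [] => []
  | c :: rest =>
    (List.range ((rest.map List.length).foldl min c.length)).map
      (fun i => (c :: rest).map (fun col => col.getD i ""))

def compose_rows (data : List (String × List String)) (order_by : String) : List (List String) :=
  let d := PySem.Dict.ofList data
  let header := d.keys
  match PySem.List.index? header order_by with
  | none => []   -- rows[0].index(order_by) raises ValueError: excluded by Pre_
  | some order_index =>
    let set_of_values := pyZipStar d.values
    let sorted_set := PySem.List.sorted set_of_values (fun v => PySem.List.pyGetD v (order_index : Int) "")
    [header] ++ sorted_set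

-- ===== PORT B =====
def compose_rows_alt (data : List (String × List String)) (order_by : String) : List (List String) :=
  let d := PySem.Dict.ofList data
  let cols := d.values
  match PySem.List.min? (cols.map (fun c => (c.length : Int))) (fun x => x) with
  | none => []   -- min() over an empty dict raises ValueError: excluded by Pre_
  | some n =>
    match d.get? order_by with
    | none => []   -- data[order_by] raises KeyError: excluded by Pre_
    | some order_col =>
      -- for i in range(n): buckets.setdefault(order_col[i], []).append([c[i] for c in cols])
      -- (every index below is in range: n = min of the column lengths, so getD's default is never used)
      let buckets := (PySem.List.pyRange 0 n).foldl
        (fun b i => b.modify (PySem.List.pyGetD order_col i "") []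
          (fun rs => rs ++ [cols.map (fun c => PySem.List.pyGetD c i "")]))
        PySem.Dict.empty
      -- for value in sorted(buckets): rows.extend(buckets[value])  (value is always a key of buckets)
      (PySem.List.sorted buckets.keys (fun v => v) false).foldl
        (fun rows v => rows ++ buckets.getD v []) [d.keys]

-- ===== PRECONDITION & SPEC =====
-- Pre_ excludes exactly the inputs where A raises ValueError: order_by not among the dict's keys
-- (in particular the empty dict).
def Pre_compose_rows (data : List (String × List String)) (order_by : String) : Prop :=
  order_by ∈ (PySem.Dict.ofList data).keys
instance (data : List (String × List String)) (order_by : String) : Decidable (Pre_compose_rows data order_by) := by unfold Pre_compose_rows; infer_instance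
def pvWitness_compose_rows : (List (String × List String)) × String :=
  ([("D1", ["b", "a"]), ("D2", ["x", "y"])], "D1")

def Spec_compose_rows (data : List (String × List String)) (order_by : String) (out : List (List String)) : Prop := out = compose_rows_alt data order_by
instance (data : List (String × List String)) (order_by : String) (out : List (List String)) : Decidable (Spec_compose_rows data order_by out) := by unfold Spec_compose_rows; infer_instance

-- ===== CLAIM (what is proved, stated in full; the proofs are below) =====
def Claim_equal_compose_rows : Prop := ∀ (data : List (String × List String)) (order_by : String), Dom_compose_rows data order_by → Pre_compose_rows data order_by → Spec_compose_rows data order_by (compose_rows data order_by)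

-- ===== LEMMAS AND PROOFS =====

-- inserting an element that goes before everything puts it in front
lemma insertBy_of_forall_before {α : Type} (bef : α → α → Bool) (x : α) (ys : List α)
    (h : ∀ y ∈ ys, bef x y = true) :
    PySem.List.insertBy bef x ys = x :: ys := by
  cases ys with
  | nil => rfl
  | cons y ys => simp [PySem.List.insertBy, h y (List.mem_cons_self)]

-- insertion passes over a prefix it does not go before
lemma insertBy_append_of_not_before {α : Type} (bef : α → α → Bool) (x : α) (as bs : List α)
    (h : ∀ y ∈ as, bef x y = false) :
    PySem.List.insertBy bef x (as ++ bs) = as ++ PySem.List.insertBy bef x bs := by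
  induction as with
  | nil => rfl
  | cons a as ih =>
    simp only [List.cons_append, PySem.List.insertBy, h a (List.mem_cons_self)]
    simp [ih (fun y hy => h y (List.mem_cons_of_mem a hy))]

-- stable insertion of one element into a bucket-flattened list: the element lands at the
-- end of its own key's bucket (creating the bucket in key order if it is new)
lemma insertBy_flatMap {α : Type} (f : α → String) (x : α) (ks : List String)
    (g : String → List α)
    (hks : ks.Pairwise (· < ·))
    (hg : ∀ v ∈ ks, ∀ r ∈ g v, f r = v)
    (hfresh : f x ∉ ks → g (f x) = []) :
    PySem.List.insertBy (fun a b => decide (f a < f b)) x (ks.flatMap g)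
      = (if f x ∈ ks then ks
         else PySem.List.insertBy (fun a b => decide (a < b)) (f x) ks).flatMap
          (fun v => g v ++ if f x == v then [x] else []) := by
  induction ks with
  | nil =>
    simp only [List.not_mem_nil, if_neg (fun h => h)]
    simp [PySem.List.insertBy, hfresh (by simp)]
  | cons k t ih =>
    have hkt : ∀ v ∈ t, k < v := by
      intro v hv; exact (List.pairwise_cons.1 hks).1 v hv
    rcases lt_trichotomy (f x) k with hlt | heq | hgt
    · -- f x < k : new smallest bucket in front
      have hnotmem : f x ∉ k :: t := by
        intro hmem
        rcases List.mem_cons.1 hmem with h | h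
        · exact absurd (h ▸ hlt) (lt_irrefl _)
        · exact absurd (lt_trans hlt (hkt _ h)) (lt_irrefl _)
      rw [if_neg hnotmem]
      have hall : ∀ y ∈ (k :: t).flatMap g, (fun a b => decide (f a < f b)) x y = true := by
        intro y hy
        rcases List.mem_flatMap.1 hy with ⟨v, hv, hyv⟩
        have : f y = v := hg v hv y hyv
        have hvk : k ≤ v := by
          rcases List.mem_cons.1 hv with h | h
          · exact le_of_eq h.symm
          · exact le_of_lt (hkt _ h)
        simp [this, lt_of_lt_of_le hlt hvk]
      rw [insertBy_of_forall_before _ x _ hall]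
      have hins : PySem.List.insertBy (fun a b => decide (a < b)) (f x) (k :: t)
          = f x :: k :: t := by
        simp [PySem.List.insertBy, hlt]
      rw [hins]
      simp only [List.flatMap_cons, hfresh hnotmem, List.nil_append]
      have hxk : (f x == k) = false := by simp [ne_of_lt hlt]
      rw [show (if f x == f x then [x] else []) = [x] by simp]
      simp only [hxk, Bool.false_eq_true, if_neg (fun h => h), List.append_nil]
      refine congrArg (List.cons x) (congrArg (fun l => g k ++ l) ?_)
      refine (List.flatMap_congr ?_).symm
      intro v hv
      have : (f x == v) = false := by simp [ne_of_lt (lt_trans hlt (hkt _ hv))]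
      simp [this]
    · -- f x = k : append to the existing first bucket
      have hpass : ∀ y ∈ g k, (fun a b => decide (f a < f b)) x y = false := by
        intro y hy; simp [hg k (List.mem_cons_self) y hy, heq]
      simp only [List.flatMap_cons]
      rw [insertBy_append_of_not_before _ x _ _ hpass]
      have hall : ∀ y ∈ t.flatMap g, (fun a b => decide (f a < f b)) x y = true := by
        intro y hy
        rcases List.mem_flatMap.1 hy with ⟨v, hv, hyv⟩
        simp [hg v (List.mem_cons_of_mem k hv) y hyv, heq ▸ hkt v hv]
      rw [insertBy_of_forall_before _ x _ hall]
      rw [if_pos (heq ▸ List.mem_cons_self)]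
      simp only [List.flatMap_cons]
      rw [show (if f x == k then [x] else []) = [x] by simp [heq]]
      rw [show t.flatMap (fun v => g v ++ if f x == v then [x] else []) = t.flatMap g from
        List.flatMap_congr (fun v hv => by
          have : (f x == v) = false := by simp [heq ▸ ne_of_lt (hkt v hv)]
          simp [this])]
      simp
    · -- k < f x : pass the first bucket, recurse
      have hpass : ∀ y ∈ g k, (fun a b => decide (f a < f b)) x y = false := by
        intro y hy
        simp [hg k (List.mem_cons_self) y hy, not_lt.2 (le_of_lt hgt)]
      simp only [List.flatMap_cons]
      rw [insertBy_append_of_not_before _ x _ _ hpass]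
      have hxk : f x ≠ k := ne_of_gt hgt
      have hmem_iff : (f x ∈ k :: t) ↔ (f x ∈ t) := by
        simp [List.mem_cons, hxk]
      have ih' := ih (List.pairwise_cons.1 hks).2
        (fun v hv => hg v (List.mem_cons_of_mem k hv))
        (fun hnm => hfresh (fun hm => hnm (hmem_iff.1 hm)))
      rw [ih']
      have hxkb : (f x == k) = false := by simp [hxk]
      by_cases hm : f x ∈ t
      · rw [if_pos hm, if_pos (hmem_iff.2 hm)]
        simp [hxk]
      · rw [if_neg hm, if_neg (fun h => hm (hmem_iff.1 h))]
        have : PySem.List.insertBy (fun a b => decide (a < b)) (f x) (k :: t)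
            = k :: PySem.List.insertBy (fun a b => decide (a < b)) (f x) t := by
          simp [PySem.List.insertBy, not_lt.2 (le_of_lt hgt)]
        rw [this]
        simp [hxk]

-- a stable sort IS a bucket sort: sorted(xs, key) = concatenation, over the distinct key
-- values in ascending order, of the rows with that key in original order
lemma stable_sort_eq_buckets {α : Type} (f : α → String) (xs : List α) :
    PySem.List.sorted xs f false
      = (PySem.List.sorted (PySem.Set.ofList (xs.map f)) (fun v => v) false).flatMap
          (fun v => xs.filter (fun r => f r == v)) := by
  induction xs using List.reverseRecOn with
  | nil => rfl
  | append_singleton xs x ih =>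
    rw [PySem.List.sorted_eq_foldl_insertBy, List.foldl_append, ← PySem.List.sorted_eq_foldl_insertBy]
    simp only [List.foldl_cons, List.foldl_nil]
    rw [ih]
    set S := PySem.Set.ofList (xs.map f) with hS
    set ks := PySem.List.sorted S (fun v => v) false with hks
    have hperm : ks.Perm S := PySem.List.sorted_perm S (fun v => v) false
    have hmemks : ∀ v, v ∈ ks ↔ v ∈ S := fun v => hperm.mem_iff
    have hnd : ks.Nodup := hperm.nodup_iff.2 (PySem.Set.nodup_ofList _)
    have hpw : ks.Pairwise (· < ·) := by
      have hle : ks.Pairwise (fun a b => a ≤ b) := PySem.List.sorted_pairwise S (fun v => v)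
      exact (hle.and hnd).imp (fun h => lt_of_le_of_ne h.1 h.2)
    have hg : ∀ v ∈ ks, ∀ r ∈ xs.filter (fun r => f r == v), f r = v := by
      intro v _ r hr
      exact beq_iff_eq.1 (List.mem_filter.1 hr).2
    have hfresh : f x ∉ ks → xs.filter (fun r => f r == f x) = [] := by
      intro hnm
      rw [List.filter_eq_nil_iff]
      intro r hr hb
      exact hnm ((hmemks _).2 ((PySem.Set.mem_ofList _ _).2
        (List.mem_map.2 ⟨r, hr, beq_iff_eq.1 hb⟩)))
    rw [insertBy_flatMap f x ks _ hpw hg hfresh]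
    -- the new sorted key list
    have hSnew : PySem.Set.ofList ((xs ++ [x]).map f) = PySem.Set.add S (f x) := by
      rw [PySem.Set.ofList_eq_foldl, List.map_append, List.foldl_append, ← PySem.Set.ofList_eq_foldl]
      rfl
    have hksnew : PySem.List.sorted (PySem.Set.ofList ((xs ++ [x]).map f)) (fun v => v) false
        = if f x ∈ ks then ks else PySem.List.insertBy (fun a b => decide (a < b)) (f x) ks := by
      rw [hSnew]
      by_cases hm : f x ∈ ks
      · have hcts : S.contains (f x) = true := by
          simp [PySem.Set.contains]; exact (hmemks _).1 hm
        have : PySem.Set.add S (f x) = S := by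
          unfold PySem.Set.add; rw [if_pos hcts]
        rw [this, if_pos hm, hks]
      · have hcts : ¬ S.contains (f x) = true := by
          simp [PySem.Set.contains]; exact fun h => hm ((hmemks _).2 h)
        have : PySem.Set.add S (f x) = S ++ [f x] := by
          unfold PySem.Set.add; rw [if_neg hcts]
        rw [this, if_neg hm]
        rw [PySem.List.sorted_eq_foldl_insertBy, List.foldl_append, ← PySem.List.sorted_eq_foldl_insertBy]
        simp [← hks]
    rw [← hksnew]
    refine List.flatMap_congr ?_
    intro v _
    rw [List.filter_append]
    simp only [List.filter_cons, List.filter_nil]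

-- casting a running Nat minimum to Int
lemma foldl_min_cast (rest : List (List String)) (a : Nat) :
    (rest.map (fun c => (c.length : Int))).foldl min (a : Int)
      = (((rest.map List.length).foldl min a : Nat) : Int) := by
  induction rest generalizing a with
  | nil => rfl
  | cons c rest ih =>
    simp only [List.map_cons, List.foldl_cons, ← Nat.cast_min]
    exact ih _

theorem compose_rows_spec : Claim_equal_compose_rows := by
  intro data order_by _hdom hpre
  unfold Spec_compose_rows compose_rows compose_rows_alt
  have hpre' : order_by ∈ (PySem.Dict.ofList data).keys := hpre
  obtain ⟨k, hk⟩ := Option.isSome_iff_exists.1 (List.isSome_idxOf?.mpr hpre')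
  have hk' : PySem.List.index? ((PySem.Dict.ofList data).keys) order_by = some k := hk
  have hklt : k < (PySem.Dict.ofList data).keys.length :=
    (List.idxOf?_eq_some_iff.1 hk).fst
  have hlen : (PySem.Dict.ofList data).keys.length = (PySem.Dict.ofList data).values.length := by
    simp [PySem.Dict.keys, PySem.Dict.values]
  have hkltv : k < (PySem.Dict.ofList data).values.length := hlen ▸ hklt
  obtain ⟨c0, rest, hcols⟩ : ∃ c0 rest, (PySem.Dict.ofList data).values = c0 :: rest := by
    cases h : (PySem.Dict.ofList data).values with
    | nil => rw [h] at hkltv; exact absurd hkltv (by simp)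
    | cons c0 rest => exact ⟨c0, rest, rfl⟩
  simp only [hk', hcols]
  set nN : Nat := (rest.map List.length).foldl min c0.length with hnN
  have hmin : PySem.List.min? ((c0 :: rest).map (fun c => (c.length : Int))) (fun x => x)
      = some (nN : Int) := by
    rw [List.map_cons, PySem.List.min?_id_cons, foldl_min_cast]
  rw [hmin]
  -- data[order_by] is the k-th value column
  set d := PySem.Dict.ofList data with hd
  have hnd : d.keys.Nodup := PySem.Dict.nodup_keys_ofList data
  have hkeyk : d.keys[k]'hklt = order_by := (List.idxOf?_eq_some_iff.1 hk).choose_spec.1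
  have hget : d.get? order_by = some ((c0 :: rest).getD k []) := by
    apply PySem.Dict.get?_of_mem_items d _ hnd
    have hkitems : k < d.items.length := by
      simpa [PySem.Dict.keys] using hklt
    have h1 : d.items[k]'hkitems = (order_by, (c0 :: rest).getD k []) := by
      have e1 : d.items[k].1 = order_by := by
        simpa [PySem.Dict.keys] using hkeyk
      have e2 : d.items[k].2 = (c0 :: rest).getD k [] := by
        have : d.values.getD k [] = d.items[k].2 := by
          rw [List.getD_eq_getElem d.values [] (by simpa using hkltv)]
          simp [PySem.Dict.values]
        rw [← this, hcols, List.getD_eq_getElem _ _ (by simpa [← hcols] using hkltv)]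
      rw [← e1, ← e2]
    rw [← h1]
    exact List.getElem_mem hkitems
  rw [hget]
  dsimp only
  -- shared abbreviations: the rows and the key function
  set row : Nat → List String := fun i => (c0 :: rest).map (fun c => c.getD i "") with hrow
  set ps : List (List String) := (List.range nN).map row with hps
  set key : List String → String := fun r => PySem.List.pyGetD r (k : Int) "" with hkey
  have hkv : k < (c0 :: rest).length := by simpa [← hcols] using hkltv
  -- the bucket key of row i is the order column's i-th entry
  have hbk : ∀ i : Nat, ((c0 :: rest).getD k []).getD i "" = key (row i) := by
    intro i
    rw [hkey, hrow]
    simp only [PySem.List.pyGetD_natCast]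
    rw [List.getD_eq_getElem _ _ hkv,
        List.getD_eq_getElem _ _ (show k < ((c0 :: rest).map (fun c => c.getD i "")).length by simpa using hkv),
        List.getElem_map]
  -- B's bucket loop, as a fold over (key, row) pairs
  set pairs : List (String × List String) := (List.range nN).map (fun i => (key (row i), row i)) with hpairs
  have hbuck : (PySem.List.pyRange 0 (nN : Int)).foldl
      (fun b i => b.modify (PySem.List.pyGetD ((c0 :: rest).getD k []) i "") []
        (fun rs => rs ++ [(c0 :: rest).map (fun c => PySem.List.pyGetD c i "")]))
      PySem.Dict.empty
      = pairs.foldl (fun b p => b.modify p.1 [] (fun rs => rs ++ [p.2])) PySem.Dict.empty := by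
    rw [PySem.List.pyRange_zero_natCast, List.foldl_map, hpairs, List.foldl_map]
    refine PySem.List.foldl_congr_mem _ _ _ _ ?_
    intro acc i _
    simp only [PySem.List.pyGetD_natCast]
    rw [hbk i]
  rw [hbuck]
  set buckets := pairs.foldl (fun b p => b.modify p.1 [] (fun rs => rs ++ [p.2])) PySem.Dict.empty with hbuckets
  have hkeys : buckets.keys = PySem.Set.ofList (ps.map key) := by
    rw [hbuckets]
    rw [PySem.Dict.keys_foldl_modify_key pairs Prod.fst [] (fun b p => fun rs => rs ++ [p.2]) PySem.Dict.empty]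
    rw [PySem.Set.ofList_eq_foldl]
    simp [PySem.Set.update, PySem.Dict.keys_empty, hpairs, hps, List.map_map, Function.comp_def]
  have hgetD : ∀ v, buckets.getD v [] = ps.filter (fun r => key r == v) := by
    intro v
    rw [hbuckets, PySem.Dict.getD_foldl_modify_append, PySem.Dict.getD_empty]
    have hpm : pairs = ps.map (fun r => (key r, r)) := by
      rw [hpairs, hps, List.map_map]; rfl
    rw [hpm, List.filter_map, List.map_map]
    simp [Function.comp_def]
  rw [PySem.List.foldl_append_eq_flatMap, hkeys]
  have hflat : (PySem.List.sorted (PySem.Set.ofList (ps.map key)) (fun v => v) false).flatMap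
      (fun v => buckets.getD v [])
      = (PySem.List.sorted (PySem.Set.ofList (ps.map key)) (fun v => v) false).flatMap
        (fun v => ps.filter (fun r => key r == v)) :=
    List.flatMap_congr (fun v _ => hgetD v)
  rw [hflat, ← stable_sort_eq_buckets key ps]
  -- A's zipped rows are the same list of rows
  have hzip : pyZipStar (c0 :: rest) = ps := rfl
  rw [hzip]

-- ===== VERDICT (by name: the statement is the Claim_ definition above) =====
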